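-- pv_equiv track=rewrite | github.com/pawan-shewale/python-mini-challenges | code.py | k_distinct
-- ===== SOURCE A (Python) =====
-- def k_distinct(string,k):
--     string = str(string).lower()
--     alist = []
--     for x in string:
--
--         if x not in alist:
--             alist.append(x)
--     if(len(alist)==k):
--         return True
--     else:
--         return False
-- ===== SOURCE B (Python) =====
-- def k_distinct(string, k):
--     s = sorted(str(string).lower())
--     count = 0
--     prev = None
--     for c in s:
--         if c != prev:
--             count += 1
--         prev = c
--     return count == k
-- ===== Notes on version B (the rewrite author's own statement) =====
-- stated objective: alternative
-- what changed: Replaces A's growing membership-scanned dedup list with sort-then-single-pass counting of adjacent changes.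
import Mathlib
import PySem

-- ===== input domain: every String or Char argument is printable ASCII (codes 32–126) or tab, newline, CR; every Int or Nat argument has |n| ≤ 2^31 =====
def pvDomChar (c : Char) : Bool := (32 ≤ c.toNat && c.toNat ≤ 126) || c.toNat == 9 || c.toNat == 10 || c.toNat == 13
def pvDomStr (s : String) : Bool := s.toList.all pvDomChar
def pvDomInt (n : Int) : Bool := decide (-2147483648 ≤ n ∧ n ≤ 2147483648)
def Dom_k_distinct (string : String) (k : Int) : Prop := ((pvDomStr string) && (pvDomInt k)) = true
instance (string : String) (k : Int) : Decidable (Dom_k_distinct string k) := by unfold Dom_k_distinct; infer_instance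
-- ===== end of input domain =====

-- B replaces A's growing membership-scanned dedup list with sort-then-one-pass counting of adjacent changes (alternative algorithm, similar cost).


-- ===== PORT A =====
def k_distinct (string : String) (k : Int) : Bool :=
  let cs := PySem.Chars.lower string.toList
  let alist := cs.foldl (fun acc x => if x ∈ acc then acc else acc ++ [x]) []
  if (alist.length : Int) = k then true else false

-- ===== PORT B =====
def k_distinct_alt (string : String) (k : Int) : Bool :=
  let s := PySem.List.sorted (PySem.Chars.lower string.toList) (fun x => x) false
  let st := s.foldl
    (fun (st : Int × Option Char) c =>
      if (some c ≠ st.2) then (st.1 + 1, some c) else (st.1, some c)) (0, none)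
  st.1 == k

-- ===== PRECONDITION & SPEC =====
def Spec_k_distinct (string : String) (k : Int) (out : Bool) : Prop := out = k_distinct_alt string k
instance (string : String) (k : Int) (out : Bool) : Decidable (Spec_k_distinct string k out) := by unfold Spec_k_distinct; infer_instance

-- ===== CLAIM (what is proved, stated in full; the proofs are below) =====
def Claim_equal_k_distinct : Prop := ∀ (string : String) (k : Int), Dom_k_distinct string k → Spec_k_distinct string k (k_distinct string k)

-- ===== LEMMAS AND PROOFS =====

-- A's loop builds a nodup list whose element set is that of the input.
theorem aLoop_inv (l acc : List Char) (h : acc.Nodup) :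
    (l.foldl (fun acc x => if x ∈ acc then acc else acc ++ [x]) acc).Nodup ∧
    (l.foldl (fun acc x => if x ∈ acc then acc else acc ++ [x]) acc).toFinset
      = acc.toFinset ∪ l.toFinset := by
  induction l generalizing acc with
  | nil => simp [h]
  | cons x t ih =>
    by_cases hx : x ∈ acc
    · have := ih acc h
      simp only [List.foldl_cons, if_pos hx]
      refine ⟨this.1, ?_⟩
      rw [this.2]
      ext y
      simp only [Finset.mem_union, List.mem_toFinset, List.mem_cons]
      constructor
      · rintro (hy | hy) <;> tauto
      · rintro (hy | (rfl | hy)) <;> tauto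
    · have hnd : (acc ++ [x]).Nodup := by
        simp [List.nodup_append, h]
        exact fun a ha h' => hx (h' ▸ ha)
      have := ih (acc ++ [x]) hnd
      simp only [List.foldl_cons, if_neg hx]
      refine ⟨this.1, ?_⟩
      rw [this.2]
      ext y
      simp only [Finset.mem_union, List.mem_toFinset, List.mem_append,
        List.mem_cons]
      tauto

-- B's scan over a sorted tail: starting after p was counted, it adds one per new value.
theorem bScan_sorted (l : List Char) :
    ∀ (p : Char) (c : Int), (p :: l).Pairwise (· ≤ ·) →
    (l.foldl (fun (st : Int × Option Char) c =>
        if (some c ≠ st.2) then (st.1 + 1, some c) else (st.1, some c)) (c, some p)).1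
      = c + ((p :: l).toFinset.card : Int) - 1 := by
  induction l with
  | nil => intro p c _; simp
  | cons x t ih =>
    intro p c h
    have hpx : p ≤ x := (List.pairwise_cons.1 h).1 x (by simp)
    have hxt : (x :: t).Pairwise (· ≤ ·) := (List.pairwise_cons.1 h).2
    by_cases hxp : x = p
    · subst hxp
      have hpt : (x :: t).Pairwise (· ≤ ·) := hxt
      simp only [List.foldl_cons, ne_eq, not_true_eq_false, if_false]
      rw [ih x c hpt]
      congr 2
      simp
    · simp only [List.foldl_cons, if_pos (by simp [hxp] : (some x ≠ some p))]
      rw [ih x (c + 1) hxt]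
      have hpnot : p ∉ (x :: t).toFinset := by
        simp only [List.toFinset_cons, Finset.mem_insert, List.mem_toFinset]
        rintro (rfl | hpt)
        · exact hxp rfl
        · have hxy : x ≤ p := (List.pairwise_cons.1 hxt).1 p hpt
          exact hxp (le_antisymm hxy hpx)
      have : ((p :: x :: t).toFinset.card) = (x :: t).toFinset.card + 1 := by
        simp only [List.toFinset_cons (a := p)]
        rw [Finset.card_insert_of_notMem hpnot]
      rw [this]
      push_cast
      ring

-- B's full scan counts the number of distinct elements of a sorted list.
theorem bScan_count (s : List Char) (h : s.Pairwise (· ≤ ·)) :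
    (s.foldl (fun (st : Int × Option Char) c =>
        if (some c ≠ st.2) then (st.1 + 1, some c) else (st.1, some c)) (0, none)).1
      = (s.toFinset.card : Int) := by
  cases s with
  | nil => simp
  | cons p t =>
    simp only [List.foldl_cons, if_pos (by simp : (some p ≠ (none : Option Char)))]
    rw [bScan_sorted t p (0 + 1) h]
    push_cast
    ring

-- ===== VERDICT (by name: the statement is the Claim_ definition above) =====
theorem k_distinct_spec : Claim_equal_k_distinct := by
  intro string k _
  unfold Spec_k_distinct k_distinct k_distinct_alt
  set cs := PySem.Chars.lower string.toList with hcs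
  have hA := aLoop_inv cs [] (by simp)
  have hlen : ((cs.foldl (fun acc x => if x ∈ acc then acc else acc ++ [x]) []).length : Int)
      = (cs.toFinset.card : Int) := by
    rw [← List.toFinset_card_of_nodup hA.1, hA.2]
    simp
  have hperm : (PySem.List.sorted cs (fun x => x) false).Perm cs :=
    PySem.List.sorted_perm cs (fun x => x) false
  have hsortedFin : (PySem.List.sorted cs (fun x => x) false).toFinset = cs.toFinset :=
    List.toFinset_eq_of_perm _ _ hperm
  have hpw : (PySem.List.sorted cs (fun x => x) false).Pairwise (· ≤ ·) := by
    have := PySem.List.sorted_pairwise cs (fun x => x)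
    exact this
  have hB := bScan_count (PySem.List.sorted cs (fun x => x) false) hpw
  rw [hsortedFin] at hB
  simp only [hB, hlen]
  by_cases hk : (cs.toFinset.card : Int) = k
  · simp [hk]
  · simp [hk]
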